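-- pv_equiv track=rewrite | github.com/rahulsamant37/DSA_Python | basic/017_dynamic_programming/003_longest_common_subsequence.py | lcs_diff
-- ===== SOURCE A (Python) =====
-- from typing import List, Tuple, Optional
--
-- def lcs_with_positions(str1: str, str2: str) -> Tuple[str, List[int], List[int]]:
--     """
--     Find LCS with positions in both strings
--
--     Returns:
--         Tuple of (lcs_string, positions_in_str1, positions_in_str2)
--     """
--     m, n = len(str1), len(str2)
--
--     # Build DP table
--     dp = [[0 for _ in range(n + 1)] for _ in range(m + 1)]
--
--     for i in range(1, m + 1):
--         for j in range(1, n + 1):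
--             if str1[i-1] == str2[j-1]:
--                 dp[i][j] = dp[i-1][j-1] + 1
--             else:
--                 dp[i][j] = max(dp[i-1][j], dp[i][j-1])
--
--     # Backtrack to get LCS and positions
--     lcs = []
--     pos1 = []
--     pos2 = []
--     i, j = m, n
--
--     while i > 0 and j > 0:
--         if str1[i-1] == str2[j-1]:
--             lcs.append(str1[i-1])
--             pos1.append(i-1)
--             pos2.append(j-1)
--             i -= 1
--             j -= 1
--         elif dp[i-1][j] > dp[i][j-1]:
--             i -= 1
--         else:
--             j -= 1
--
--     # Reverse since we built backwards
--     lcs.reverse()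
--     pos1.reverse()
--     pos2.reverse()
--
--     return ''.join(lcs), pos1, pos2
--
-- def lcs_diff(str1: str, str2: str) -> Tuple[List[str], List[str]]:
--     """
--     Create a diff-like output showing additions and deletions
--
--     Returns:
--         Tuple of (operations_str1, operations_str2)
--         where each operation is either the character or a marker
--     """
--     lcs, pos1, pos2 = lcs_with_positions(str1, str2)
--
--     diff1 = []
--     diff2 = []
--
--     # Process str1
--     lcs_idx = 0
--     for i, char in enumerate(str1):
--         if lcs_idx < len(pos1) and i == pos1[lcs_idx]:
--             diff1.append(char)  # Common character
--             lcs_idx += 1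
--         else:
--             diff1.append(f"-{char}")  # Deleted from str1
--
--     # Process str2
--     lcs_idx = 0
--     for i, char in enumerate(str2):
--         if lcs_idx < len(pos2) and i == pos2[lcs_idx]:
--             diff2.append(char)  # Common character
--             lcs_idx += 1
--         else:
--             diff2.append(f"+{char}")  # Added in str2
--
--     return diff1, diff2
-- ===== SOURCE B (Python) =====
-- from typing import List, Tuple
--
--
-- def lcs_diff(str1: str, str2: str) -> Tuple[List[str], List[str]]:
--     """Diff via one fused backtracking pass over the LCS DP table:
--     no position arrays and no forward re-scans of the inputs."""
--     m, n = len(str1), len(str2)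
--
--     dp = [[0] * (n + 1) for _ in range(m + 1)]
--     for i in range(1, m + 1):
--         for j in range(1, n + 1):
--             if str1[i - 1] == str2[j - 1]:
--                 dp[i][j] = dp[i - 1][j - 1] + 1
--             else:
--                 dp[i][j] = max(dp[i - 1][j], dp[i][j - 1])
--
--     diff1: List[str] = []
--     diff2: List[str] = []
--     i, j = m, n
--     while i > 0 and j > 0:
--         if str1[i - 1] == str2[j - 1]:
--             diff1.append(str1[i - 1])
--             diff2.append(str2[j - 1])
--             i -= 1
--             j -= 1
--         elif dp[i - 1][j] > dp[i][j - 1]: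
--             diff1.append("-" + str1[i - 1])
--             i -= 1
--         else:
--             diff2.append("+" + str2[j - 1])
--             j -= 1
--     while i > 0:
--         diff1.append("-" + str1[i - 1])
--         i -= 1
--     while j > 0:
--         diff2.append("+" + str2[j - 1])
--         j -= 1
--
--     diff1.reverse()
--     diff2.reverse()
--     return diff1, diff2
-- ===== Notes on version B (the rewrite author's own statement) =====
-- stated objective: simpler
-- what changed: Fuses backtracking and diff construction into one backward pass over the DP table, dropping the LCS string, both position arrays and the two forward pointer re-scans of A.
import Mathlib
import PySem

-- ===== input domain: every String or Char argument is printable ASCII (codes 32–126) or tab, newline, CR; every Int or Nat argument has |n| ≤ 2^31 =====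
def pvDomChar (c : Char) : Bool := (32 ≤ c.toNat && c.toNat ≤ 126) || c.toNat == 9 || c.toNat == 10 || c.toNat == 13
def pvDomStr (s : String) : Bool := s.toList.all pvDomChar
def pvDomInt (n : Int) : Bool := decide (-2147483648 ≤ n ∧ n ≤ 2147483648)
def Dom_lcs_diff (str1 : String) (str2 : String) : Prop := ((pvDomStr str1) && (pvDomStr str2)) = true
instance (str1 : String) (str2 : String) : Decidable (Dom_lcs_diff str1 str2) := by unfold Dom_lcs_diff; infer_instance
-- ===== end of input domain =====

-- B fuses backtracking and diff construction into one backward pass over the same DP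
-- table, dropping the LCS string, the position arrays and A's two forward re-scans (simpler).

-- ===== PORT A =====
-- shared helper: the LCS DP table, built row by row exactly as both Pythons build it
def dpRow (s1 s2 : List Char) (prev : List Nat) (i : Nat) : List Nat :=
  (List.range s2.length).foldl (fun row j =>
    row ++ [if s1.getD i ' ' = s2.getD j ' ' then prev.getD j 0 + 1
            else max (prev.getD (j+1) 0) (row.getD j 0)]) [0]

def dpTable (s1 s2 : List Char) : List (List Nat) :=
  let row0 := List.replicate (s2.length + 1) 0
  ((List.range s1.length).foldl (fun (st : List Nat × List (List Nat)) i =>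
    (dpRow s1 s2 st.1 i, st.2 ++ [dpRow s1 s2 st.1 i])) (row0, [row0])).2

def dpGet (dp : List (List Nat)) (i j : Nat) : Nat := (dp.getD i []).getD j 0

-- A's backtracking while-loop (indices shifted by one: Lean (i+1, j+1) is Python (i, j))
def btA (s1 s2 : List Char) (dp : List (List Nat)) : Nat → Nat → List Char × List Nat × List Nat
  | i+1, j+1 =>
    if s1.getD i ' ' = s2.getD j ' ' then
      (s1.getD i ' ' :: (btA s1 s2 dp i j).1,
       i :: (btA s1 s2 dp i j).2.1, j :: (btA s1 s2 dp i j).2.2)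
    else if dpGet dp i (j+1) > dpGet dp (i+1) j then
      btA s1 s2 dp i (j+1)
    else
      btA s1 s2 dp (i+1) j
  | _+1, 0 => ([], [], [])
  | 0, _ => ([], [], [])
  termination_by i j => i + j

def lcs_with_positions (str1 : String) (str2 : String) : String × List Nat × List Nat :=
  let s1 := str1.toList
  let s2 := str2.toList
  let r := btA s1 s2 (dpTable s1 s2) s1.length s2.length
  (String.ofList r.1.reverse, r.2.1.reverse, r.2.2.reverse)

-- A's forward marking pass: `for i, char in enumerate(s)` with the lcs_idx pointer
def markFold (tag : Char) (pos : List Nat) (cs : List Char) : List String :=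
  ((cs.zipIdx 0).foldl (fun (st : Nat × List String) p =>
    if st.1 < pos.length ∧ pos.getD st.1 0 = p.2 then (st.1 + 1, st.2 ++ [String.ofList [p.1]])
    else (st.1, st.2 ++ [String.ofList [tag, p.1]])) (0, [])).2

def lcs_diff (str1 : String) (str2 : String) : List String × List String :=
  let r := lcs_with_positions str1 str2
  (markFold '-' r.2.1 str1.toList, markFold '+' r.2.2 str2.toList)

-- ===== PORT B =====
-- B's fused backtracking: builds both diff lists (backwards) in the single walk,
-- including the two flush loops (the i+1,0 and 0,j+1 cases)
def btB (s1 s2 : List Char) (dp : List (List Nat)) : Nat → Nat → List String × List String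
  | i+1, j+1 =>
    if s1.getD i ' ' = s2.getD j ' ' then
      (String.ofList [s1.getD i ' '] :: (btB s1 s2 dp i j).1,
       String.ofList [s2.getD j ' '] :: (btB s1 s2 dp i j).2)
    else if dpGet dp i (j+1) > dpGet dp (i+1) j then
      (String.ofList ['-', s1.getD i ' '] :: (btB s1 s2 dp i (j+1)).1, (btB s1 s2 dp i (j+1)).2)
    else
      ((btB s1 s2 dp (i+1) j).1, String.ofList ['+', s2.getD j ' '] :: (btB s1 s2 dp (i+1) j).2)
  | i+1, 0 =>
    (String.ofList ['-', s1.getD i ' '] :: (btB s1 s2 dp i 0).1, (btB s1 s2 dp i 0).2)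
  | 0, j+1 =>
    ((btB s1 s2 dp 0 j).1, String.ofList ['+', s2.getD j ' '] :: (btB s1 s2 dp 0 j).2)
  | 0, 0 => ([], [])
  termination_by i j => i + j

def lcs_diff_alt (str1 : String) (str2 : String) : List String × List String :=
  let s1 := str1.toList
  let s2 := str2.toList
  let r := btB s1 s2 (dpTable s1 s2) s1.length s2.length
  (r.1.reverse, r.2.reverse)

-- ===== PRECONDITION & SPEC =====
def Spec_lcs_diff (str1 : String) (str2 : String) (out : List String × List String) : Prop := out = lcs_diff_alt str1 str2
instance (str1 : String) (str2 : String) (out : List String × List String) : Decidable (Spec_lcs_diff str1 str2 out) := by unfold Spec_lcs_diff; infer_instance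

-- ===== CLAIM (what is proved, stated in full; the proofs are below) =====
def Claim_equal_lcs_diff : Prop := ∀ (str1 : String) (str2 : String), Dom_lcs_diff str1 str2 → Spec_lcs_diff str1 str2 (lcs_diff str1 str2)

-- ===== LEMMAS AND PROOFS =====

-- spec-level marking: scan forward, consuming the (increasing) position list from the head
def markScan (tag : Char) : List Char → Nat → List Nat → List String
  | [], _, _ => []
  | c :: cs, k, [] => String.ofList [tag, c] :: markScan tag cs (k+1) []
  | c :: cs, k, p :: ps =>
    if p = k then String.ofList [c] :: markScan tag cs (k+1) ps
    else String.ofList [tag, c] :: markScan tag cs (k+1) (p :: ps)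

-- spec-level marking backwards: scan the prefix s[0:i] from the top, consuming a decreasing list
def revMark (tag : Char) (s : List Char) : Nat → List Nat → List String
  | 0, _ => []
  | i+1, [] => String.ofList [tag, s.getD i ' '] :: revMark tag s i []
  | i+1, p :: ps =>
    if p = i then String.ofList [s.getD i ' '] :: revMark tag s i ps
    else String.ofList [tag, s.getD i ' '] :: revMark tag s i (p :: ps)

lemma markScan_skip (tag : Char) (c : Char) (cs : List Char) (k : Nat) (ps : List Nat)
    (h : ps.head?.getD (k+1) ≠ k) :
    markScan tag (c :: cs) k ps = String.ofList [tag, c] :: markScan tag cs (k+1) ps := by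
  cases ps with
  | nil => rfl
  | cons p ps => simp only [List.head?_cons, Option.getD_some] at h; simp [markScan, h]

lemma revMark_skip (tag : Char) (s : List Char) (i : Nat) (ps : List Nat)
    (h : ∀ p ∈ ps, p < i) :
    revMark tag s (i+1) ps = String.ofList [tag, s.getD i ' '] :: revMark tag s i ps := by
  cases ps with
  | nil => rfl
  | cons p ps => simp [revMark, Nat.ne_of_lt (h p (by simp))]

lemma revMark_hit (tag : Char) (s : List Char) (i : Nat) (ps : List Nat) :
    revMark tag s (i+1) (i :: ps) = String.ofList [s.getD i ' '] :: revMark tag s i ps := by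
  simp [revMark]

-- A's pointer-fold equals the head-consuming scan
lemma markFold_foldl (tag : Char) (pos : List Nat) :
    ∀ (cs : List Char) (k idx : Nat) (acc : List String),
    ((cs.zipIdx k).foldl (fun (st : Nat × List String) p =>
      if st.1 < pos.length ∧ pos.getD st.1 0 = p.2 then (st.1 + 1, st.2 ++ [String.ofList [p.1]])
      else (st.1, st.2 ++ [String.ofList [tag, p.1]])) (idx, acc)).2
    = acc ++ markScan tag cs k (pos.drop idx) := by
  intro cs
  induction cs with
  | nil => intro k idx acc; simp [markScan]
  | cons c cs ih =>
    intro k idx acc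
    rw [List.zipIdx_cons, List.foldl_cons]
    rcases hdrop : pos.drop idx with _ | ⟨p, ps⟩
    · have hlen : pos.length ≤ idx := List.drop_eq_nil_iff.mp hdrop
      rw [if_neg (fun h => absurd h.1 (by omega))]
      rw [ih (k+1) idx (acc ++ [String.ofList [tag, c]])]
      rw [hdrop]
      simp [markScan]
    · have hp : pos[idx]? = some p := by rw [← List.head?_drop, hdrop]; rfl
      obtain ⟨hidx, hval⟩ := List.getElem?_eq_some_iff.mp hp
      have hgetD : pos.getD idx 0 = p := by
        rw [List.getD_eq_getElem?_getD, hp]; rfl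
      have hdrop1 : pos.drop (idx+1) = ps := by
        rw [← List.tail_drop, hdrop]; rfl
      by_cases hpk : p = k
      · rw [if_pos ⟨hidx, by rw [hgetD]; exact hpk⟩]
        rw [ih (k+1) (idx+1) (acc ++ [String.ofList [c]])]
        rw [hdrop1]
        simp [markScan, hpk]
      · rw [if_neg (fun h => by rw [hgetD] at h; exact hpk h.2)]
        rw [ih (k+1) idx (acc ++ [String.ofList [tag, c]])]
        rw [hdrop]
        rw [markScan_skip tag c cs k (p :: ps) (by simpa using hpk)]
        simp

lemma markFold_markScan (tag : Char) (pos : List Nat) (cs : List Char) :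
    markFold tag pos cs = markScan tag cs 0 pos := by
  unfold markFold
  rw [markFold_foldl tag pos cs 0 0 []]
  simp

lemma btA_right0 (s1 s2 : List Char) (dp : List (List Nat)) (i : Nat) :
    btA s1 s2 dp i 0 = ([], [], []) := by
  cases i <;> simp [btA]

-- invariant of A's backtracking: both position lists are strictly decreasing and bounded
lemma btA_inv (s1 s2 : List Char) (dp : List (List Nat)) :
    ∀ (N i j : Nat), i + j ≤ N →
    ((btA s1 s2 dp i j).2.1.Pairwise (· > ·) ∧ (∀ p ∈ (btA s1 s2 dp i j).2.1, p < i)) ∧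
    ((btA s1 s2 dp i j).2.2.Pairwise (· > ·) ∧ (∀ q ∈ (btA s1 s2 dp i j).2.2, q < j)) := by
  intro N
  induction N with
  | zero =>
    intro i j h
    have hi : i = 0 := by omega
    subst hi
    simp [btA]
  | succ N ih =>
    intro i j h
    match i, j with
    | 0, j => simp [btA]
    | i+1, 0 => simp [btA]
    | i+1, j+1 =>
      rw [btA]
      split_ifs with h1 h2
      · obtain ⟨⟨hpw1, hlt1⟩, hpw2, hlt2⟩ := ih i j (by omega)
        refine ⟨⟨?_, ?_⟩, ?_, ?_⟩
        · exact List.pairwise_cons.mpr ⟨fun x hx => hlt1 x hx, hpw1⟩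
        · intro p hp
          rcases List.mem_cons.mp hp with hp | hp
          · omega
          · exact Nat.lt_succ_of_lt (hlt1 p hp)
        · exact List.pairwise_cons.mpr ⟨fun x hx => hlt2 x hx, hpw2⟩
        · intro q hq
          rcases List.mem_cons.mp hq with hq | hq
          · omega
          · exact Nat.lt_succ_of_lt (hlt2 q hq)
      · obtain ⟨⟨hpw1, hlt1⟩, hpw2, hlt2⟩ := ih i (j+1) (by omega)
        exact ⟨⟨hpw1, fun p hp => Nat.lt_succ_of_lt (hlt1 p hp)⟩, hpw2, hlt2⟩
      · obtain ⟨⟨hpw1, hlt1⟩, hpw2, hlt2⟩ := ih (i+1) j (by omega)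
        exact ⟨⟨hpw1, hlt1⟩, hpw2, fun q hq => Nat.lt_succ_of_lt (hlt2 q hq)⟩

-- B's fused walk produces exactly the backward marking of A's position lists
lemma btB_eq_revMark (s1 s2 : List Char) (dp : List (List Nat)) :
    ∀ (N i j : Nat), i + j ≤ N →
    btB s1 s2 dp i j =
      (revMark '-' s1 i (btA s1 s2 dp i j).2.1, revMark '+' s2 j (btA s1 s2 dp i j).2.2) := by
  intro N
  induction N with
  | zero =>
    intro i j h
    have hi : i = 0 := by omega
    have hj : j = 0 := by omega
    subst hi; subst hj
    simp [btB, revMark]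
  | succ N ih =>
    intro i j h
    match i, j with
    | 0, 0 => simp [btB, revMark]
    | 0, j+1 =>
      rw [btB, ih 0 j (by omega)]
      simp [btA, revMark]
    | i+1, 0 =>
      rw [btB, ih i 0 (by omega)]
      simp [btA_right0, revMark]
    | i+1, j+1 =>
      rw [btA, btB]
      split_ifs with h1 h2
      · rw [ih i j (by omega)]
        simp [revMark]
      · obtain ⟨⟨_, hlt1⟩, _, _⟩ := btA_inv s1 s2 dp (i + (j+1)) i (j+1) le_rfl
        rw [ih i (j+1) (by omega)]
        rw [revMark_skip '-' s1 i _ hlt1]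
      · obtain ⟨_, _, hlt2⟩ := btA_inv s1 s2 dp ((i+1) + j) (i+1) j le_rfl
        rw [ih (i+1) j (by omega)]
        rw [revMark_skip '+' s2 j _ hlt2]

-- the forward scan splits at a block boundary
lemma markScan_split (tag : Char) :
    ∀ (cs ds : List Char) (k : Nat) (qs rs : List Nat),
    qs.Pairwise (· < ·) → (∀ q ∈ qs, k ≤ q ∧ q < k + cs.length) → (∀ r ∈ rs, k + cs.length ≤ r) →
    markScan tag (cs ++ ds) k (qs ++ rs) = markScan tag cs k qs ++ markScan tag ds (k + cs.length) rs := by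
  intro cs
  induction cs with
  | nil =>
    intro ds k qs rs hpw hq hr
    have hqs : qs = [] := by
      cases qs with
      | nil => rfl
      | cons q qs => have := hq q (by simp); simp at this; omega
    subst hqs
    simp [markScan]
  | cons c cs ih =>
    intro ds k qs rs hpw hq hr
    have harith : k + (c :: cs).length = (k + 1) + cs.length := by simp; omega
    cases qs with
    | nil =>
      have hih := ih ds (k+1) [] rs (by simp) (by simp)
        (fun r hrr => by have := hr r hrr; simp at this; omega)
      simp only [List.nil_append] at hih
      rw [List.nil_append, List.cons_append]
      rw [markScan_skip tag c (cs ++ ds) k rs (by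
        cases rs with
        | nil => simp
        | cons r rs' => have := hr r (by simp); simp at this ⊢; omega)]
      rw [markScan_skip tag c cs k [] (by simp)]
      rw [harith, hih]
      simp
    | cons q qs' =>
      rw [List.pairwise_cons] at hpw
      have hql : q < k + (c :: cs).length := (hq q (by simp)).2
      have hqk' : k ≤ q := (hq q (by simp)).1
      by_cases hqk : q = k
      · subst hqk
        have hih := ih ds (q+1) qs' rs hpw.2
          (fun x hx => ⟨by have := hpw.1 x hx; omega,
                        by have := (hq x (by simp [hx])).2; simp at this ⊢; omega⟩)
          (fun r hrr => by have := hr r hrr; simp at this; omega)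
        rw [List.cons_append, List.cons_append]
        simp only [markScan]
        rw [harith, hih]
        simp
      · have hih := ih ds (k+1) (q :: qs') rs (List.pairwise_cons.mpr hpw)
          (fun x hx => by
            rcases List.mem_cons.mp hx with hx | hx
            · subst hx
              refine ⟨by omega, by simp at hql ⊢; omega⟩
            · have hx1 := hpw.1 x hx
              have hx2 := (hq x (by simp [hx])).2
              refine ⟨by omega, by simp at hx2 ⊢; omega⟩)
          (fun r hrr => by have := hr r hrr; simp at this; omega)
        simp only [List.cons_append] at hih
        rw [List.cons_append, List.cons_append]
        rw [markScan_skip tag c (cs ++ ds) k (q :: (qs' ++ rs)) (by simpa using hqk)]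
        rw [markScan_skip tag c cs k (q :: qs') (by simpa using hqk)]
        rw [harith, hih]
        simp

-- reversing the backward marking gives the forward scan of the prefix
lemma revMark_reverse (tag : Char) (s : List Char) :
    ∀ (i : Nat) (ps : List Nat), i ≤ s.length → ps.Pairwise (· > ·) → (∀ p ∈ ps, p < i) →
    (revMark tag s i ps).reverse = markScan tag (s.take i) 0 ps.reverse := by
  intro i
  induction i with
  | zero => intro ps _ _ _; simp [revMark, markScan]
  | succ i ih =>
    intro ps hi hpw hlt
    have hilen : i < s.length := by omega
    have htake : s.take (i+1) = s.take i ++ [s.getD i ' '] := by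
      rw [List.take_add_one]
      simp [List.getElem?_eq_getElem hilen, List.getD_eq_getElem?_getD]
    have hlen : (s.take i).length = i := by simp; omega
    cases ps with
    | nil =>
      have hsplit := markScan_split tag (s.take i) [s.getD i ' '] 0 ([] : List Nat) ([] : List Nat)
        (by simp) (by simp) (by simp)
      simp only [List.append_nil, Nat.zero_add, hlen] at hsplit
      rw [List.reverse_nil, htake, hsplit]
      simp only [revMark, List.reverse_cons]
      rw [ih [] (by omega) (by simp) (by simp)]
      simp [markScan]
    | cons p ps' =>
      rw [List.pairwise_cons] at hpw
      by_cases hp : p = i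
      · rw [hp]
        have hps' : ∀ x ∈ ps', x < i := fun x hx => hp ▸ hpw.1 x hx
        have hsplit := markScan_split tag (s.take i) [s.getD i ' '] 0 ps'.reverse [i]
          (List.pairwise_reverse.mpr hpw.2)
          (fun q hq => by
            rw [List.mem_reverse] at hq
            have := hps' q hq
            simp [hlen]; omega)
          (fun r hrr => by simp at hrr; subst hrr; simp [hlen])
        simp only [Nat.zero_add, hlen] at hsplit
        rw [revMark_hit, List.reverse_cons]
        rw [ih ps' (by omega) hpw.2 hps']
        rw [show ((i :: ps').reverse : List Nat) = ps'.reverse ++ [i] from by simp]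
        rw [htake, hsplit]
        simp [markScan]
      · have hplt : p < i := by have := hlt p (by simp); omega
        have hall : ∀ x ∈ p :: ps', x < i := by
          intro x hx
          rcases List.mem_cons.mp hx with hx | hx
          · omega
          · have := hpw.1 x hx; omega
        have hsplit := markScan_split tag (s.take i) [s.getD i ' '] 0 ((p :: ps').reverse) []
          (List.pairwise_reverse.mpr (List.pairwise_cons.mpr hpw))
          (fun q hq => by
            rw [List.mem_reverse] at hq
            have := hall q hq
            simp [hlen]; omega)
          (by simp)
        simp only [List.append_nil, Nat.zero_add, hlen] at hsplit
        rw [revMark_skip tag s i (p :: ps') hall]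
        rw [List.reverse_cons, htake, hsplit]
        rw [ih (p :: ps') (by omega) (List.pairwise_cons.mpr hpw) hall]
        simp [markScan]

lemma lcs_diff_eq_alt (str1 : String) (str2 : String) :
    lcs_diff str1 str2 = lcs_diff_alt str1 str2 := by
  unfold lcs_diff lcs_diff_alt lcs_with_positions
  simp only
  obtain ⟨⟨hpw1, hlt1⟩, hpw2, hlt2⟩ :=
    btA_inv str1.toList str2.toList (dpTable str1.toList str2.toList)
      (str1.toList.length + str2.toList.length) str1.toList.length str2.toList.length le_rfl
  rw [btB_eq_revMark str1.toList str2.toList (dpTable str1.toList str2.toList)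
      (str1.toList.length + str2.toList.length) str1.toList.length str2.toList.length le_rfl]
  refine Prod.ext ?_ ?_
  · simp only
    rw [markFold_markScan, revMark_reverse '-' str1.toList str1.toList.length _ le_rfl hpw1 hlt1]
    rw [List.take_length]
  · simp only
    rw [markFold_markScan, revMark_reverse '+' str2.toList str2.toList.length _ le_rfl hpw2 hlt2]
    rw [List.take_length]

-- ===== VERDICT (by name: the statement is the Claim_ definition above) =====
theorem lcs_diff_spec : Claim_equal_lcs_diff := by
  intro str1 str2 _
  exact lcs_diff_eq_alt str1 str2
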